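-- pv_equiv track=rewrite | github.com/lonesai/Interpreter | interpreter.py | getlet
-- ===== SOURCE A (Python) =====
-- def getlet(inputList):
--     lol = []
--     forIndex = 0
--     for line in inputList:
--         if line == "let":
--
--             letList = []
--             letCount = 0
--             i = forIndex
--             while i < len(inputList)-1:
--                 whileInput = inputList[i + 1]
--                 if whileInput == "let":
--                     letList.append(whileInput)
--                     letCount +=1
--                 elif whileInput == "end" and letCount == 0:
--                     lol.append(letList)
--                     break
--                 elif whileInput == "end":
--                     letList.append(whileInput)
--                     letCount -=1
--                 else:
--                     letList.append(whileInput)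
--
--                 i += 1
--
--         forIndex +=1
--     return lol
-- ===== SOURCE B (Python) =====
-- def getlet(inputList):
--     # One pass: match each 'let' to its 'end' with an index stack, then slice.
--     stack = []
--     matches = []
--     for idx, tok in enumerate(inputList):
--         if tok == "let":
--             stack.append(idx)
--         elif tok == "end" and stack:
--             matches.append((stack.pop(), idx))
--     return [inputList[j + 1:e] for j, e in sorted(matches, key=lambda p: p[0])]
-- ===== Notes on version B (the rewrite author's own statement) =====
-- stated objective: alternative
-- what changed: Instead of re-scanning forward from every 'let' to find its matching 'end', B does one stack-based bracket-matching pass collecting (let,end) index pairs, sorts them by the let index, and emits the slices between each pair.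
import Mathlib
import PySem

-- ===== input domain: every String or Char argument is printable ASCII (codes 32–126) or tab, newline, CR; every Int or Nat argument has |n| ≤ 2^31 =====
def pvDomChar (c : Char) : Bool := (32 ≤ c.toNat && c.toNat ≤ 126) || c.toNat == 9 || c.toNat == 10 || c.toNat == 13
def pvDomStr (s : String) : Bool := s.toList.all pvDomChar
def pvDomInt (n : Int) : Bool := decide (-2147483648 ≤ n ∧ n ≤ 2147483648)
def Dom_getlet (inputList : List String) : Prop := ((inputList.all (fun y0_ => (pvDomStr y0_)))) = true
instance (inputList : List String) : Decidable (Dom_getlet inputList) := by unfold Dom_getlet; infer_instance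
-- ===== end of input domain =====

-- B replaces A's forward re-scan from every 'let' by one stack-based bracket-matching pass
-- plus slicing of the matched (let, end) index pairs: an alternative algorithm, same result.

-- ===== PORT A =====
-- the inner `while i < len(inputList)-1` loop; letCount is ported as Nat: Python only
-- decrements it in the branch where `letCount == 0` was already ruled out, so it never
-- goes negative and Nat subtraction is exact.
def getletWhile (inputList : List String) (i : Nat) (letCount : Nat)
    (letList : List String) (lol : List (List String)) : List (List String) :=
  if h : i + 1 < inputList.length then   -- `i < len(inputList)-1` (equivalent over Nat)
    let whileInput := inputList[i + 1]
    if whileInput = "let" then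
      getletWhile inputList (i + 1) (letCount + 1) (letList ++ [whileInput]) lol
    else if whileInput = "end" ∧ letCount = 0 then
      lol ++ [letList]                   -- `lol.append(letList); break`
    else if whileInput = "end" then
      getletWhile inputList (i + 1) (letCount - 1) (letList ++ [whileInput]) lol
    else
      getletWhile inputList (i + 1) letCount (letList ++ [whileInput]) lol
  else lol
termination_by inputList.length - i

-- the outer `for line in inputList` loop with its forIndex counter
def getletFor (inputList : List String) (rest : List String) (forIndex : Nat)
    (lol : List (List String)) : List (List String) :=
  match rest with
  | [] => lol
  | line :: r =>
      getletFor inputList r (forIndex + 1)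
        (if line = "let" then getletWhile inputList forIndex 0 [] lol else lol)

def getlet (inputList : List String) : List (List String) :=
  getletFor inputList inputList 0 []

-- ===== PORT B =====
-- the single matching pass of Source B; the stack is stored top-first (Python appends to and
-- pops from the end of its list), matches are appended in closing order as in Source B.
def matchGo (l : List String) (idx : Nat) (stack : List Nat)
    (ms : List (Nat × Nat)) : List (Nat × Nat) :=
  match l with
  | [] => ms
  | tok :: r =>
      if tok = "let" then matchGo r (idx + 1) (idx :: stack) ms
      else if tok = "end" then
        match stack with
        | [] => matchGo r (idx + 1) [] ms
        | j :: s => matchGo r (idx + 1) s (ms ++ [(j, idx)])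
      else matchGo r (idx + 1) stack ms

def getlet_alt (inputList : List String) : List (List String) :=
  (PySem.List.sorted (matchGo inputList 0 [] []) (fun p => p.1) false).map
    (fun p => PySem.List.slice inputList (some ((p.1 + 1 : Nat) : Int)) (some ((p.2 : Nat) : Int)))

-- ===== PRECONDITION & SPEC =====
def Spec_getlet (inputList : List String) (out : List (List String)) : Prop := out = getlet_alt inputList
instance (inputList : List String) (out : List (List String)) : Decidable (Spec_getlet inputList out) := by unfold Spec_getlet; infer_instance

-- ===== CLAIM (what is proved, stated in full; the proofs are below) =====
def Claim_equal_getlet : Prop := ∀ (inputList : List String), Dom_getlet inputList → Spec_getlet inputList (getlet inputList)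

-- ===== LEMMAS AND PROOFS =====

-- position of the 'end' matching depth c in a token list (none = unmatched)
def collectPos : List String → Nat → Option Nat
  | [], _ => none
  | t :: r, c =>
      if t = "let" then (collectPos r (c + 1)).map (· + 1)
      else if t = "end" then
        (if c = 0 then some 0 else (collectPos r (c - 1)).map (· + 1))
      else (collectPos r c).map (· + 1)

-- matched (letIndex, endIndex) pairs, listed in opening order, for the suffix starting at idx
def specPairs : List String → Nat → List (Nat × Nat)
  | [], _ => []
  | t :: r, idx =>
      (if t = "let" then ((collectPos r 0).map (fun p => (idx, idx + 1 + p))).toList else [])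
        ++ specPairs r (idx + 1)

-- the segments A collects, in opening order, for a suffix
def segs : List String → List (List String)
  | [] => []
  | t :: r =>
      (if t = "let" then ((collectPos r 0).map (fun p => r.take p)).toList else []) ++ segs r

lemma drop_cons_facts {α : Type} (l : List α) (k : Nat) (t : α) (r : List α)
    (h : l.drop k = t :: r) :
    ∃ (hk : k < l.length), l[k] = t ∧ l.drop (k + 1) = r := by
  have h0 : l[k]? = some t := by
    have h1 : (l.drop k)[0]? = l[k + 0]? := List.getElem?_drop
    simpa [h] using h1.symm
  obtain ⟨hk, he⟩ := List.getElem?_eq_some_iff.mp h0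
  refine ⟨hk, he, ?_⟩
  have h2 : (l.drop k).drop 1 = r := by simp [h]
  simpa [List.drop_drop, Nat.add_comm] using h2

lemma getletWhile_eq (inputList : List String) :
    ∀ (rest : List String) (i c : Nat) (acc : List String) (lol : List (List String)),
      inputList.drop (i + 1) = rest →
      getletWhile inputList i c acc lol =
        match collectPos rest c with
        | some p => lol ++ [acc ++ rest.take p]
        | none => lol := by
  intro rest
  induction rest with
  | nil =>
      intro i c acc lol h
      have : inputList.length ≤ i + 1 := by
        by_contra hk; rw [Nat.not_le] at hk
        have := List.drop_eq_nil_iff.mp h; omega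
      rw [getletWhile]
      simp [Nat.not_lt.mpr this, collectPos]
  | cons t r ih =>
      intro i c acc lol h
      obtain ⟨hk, hget, hdrop⟩ := drop_cons_facts inputList (i + 1) t r h
      rw [getletWhile]
      rw [dif_pos hk]
      simp only [hget]
      by_cases hlet : t = "let"
      · rw [if_pos hlet]
        rw [ih (i + 1) (c + 1) (acc ++ [t]) lol hdrop]
        subst hlet
        simp only [collectPos]
        cases collectPos r (c + 1) with
        | none => simp
        | some p => simp
      · rw [if_neg hlet]
        by_cases hend : t = "end"
        · by_cases hc : c = 0
          · rw [if_pos ⟨hend, hc⟩]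
            subst hend hc
            simp [collectPos, hlet]
          · rw [if_neg (by tauto), if_pos hend]
            rw [ih (i + 1) (c - 1) (acc ++ [t]) lol hdrop]
            subst hend
            simp only [collectPos, if_neg hlet, if_neg hc]
            cases collectPos r (c - 1) with
            | none => simp
            | some p => simp
        · rw [if_neg (by tauto), if_neg hend]
          rw [ih (i + 1) c (acc ++ [t]) lol hdrop]
          simp only [collectPos, if_neg hlet, if_neg hend]
          cases collectPos r c with
          | none => simp
          | some p => simp

lemma getletFor_eq (inputList : List String) :
    ∀ (rest : List String) (fi : Nat) (lol : List (List String)),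
      inputList.drop fi = rest →
      getletFor inputList rest fi lol = lol ++ segs rest := by
  intro rest
  induction rest with
  | nil => intro fi lol h; simp [getletFor, segs]
  | cons t r ih =>
      intro fi lol h
      obtain ⟨hk, hget, hdrop⟩ := drop_cons_facts inputList fi t r h
      rw [getletFor]
      by_cases hlet : t = "let"
      · rw [if_pos hlet]
        rw [ih (fi + 1) _ hdrop]
        rw [getletWhile_eq inputList r fi 0 [] lol hdrop]
        subst hlet
        simp only [segs]
        cases collectPos r 0 with
        | none => simp
        | some p => simp
      · rw [if_neg hlet]
        rw [ih (fi + 1) _ hdrop]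
        simp [segs, hlet]

lemma getlet_eq_segs (l : List String) : getlet l = segs l := by
  simpa using getletFor_eq l l 0 [] (by simp)

@[simp] lemma matchGo_nil (idx : Nat) (s : List Nat) (m : List (Nat × Nat)) :
    matchGo [] idx s m = m := rfl

lemma matchGo_cons (t : String) (r : List String) (idx : Nat) (s : List Nat)
    (m : List (Nat × Nat)) :
    matchGo (t :: r) idx s m =
      (if t = "let" then matchGo r (idx + 1) (idx :: s) m
       else if t = "end" then
         match s with
         | [] => matchGo r (idx + 1) [] m
         | j :: s' => matchGo r (idx + 1) s' (m ++ [(j, idx)])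
       else matchGo r (idx + 1) s m) := rfl

lemma optpair_shift (j idx : Nat) (o : Option Nat) :
    Option.map (fun p => (j, idx + p)) (o.map (· + 1)) =
      Option.map (fun p => (j, idx + 1 + p)) o := by
  cases o with
  | none => rfl
  | some p => simp; omega

lemma matchGo_thread :
    ∀ (l : List String) (idx : Nat) (s : List Nat) (m : List (Nat × Nat)),
      matchGo l idx s m = m ++ matchGo l idx s [] := by
  intro l
  induction l with
  | nil => intro idx s m; simp
  | cons t r ih =>
      intro idx s m
      rw [matchGo_cons, matchGo_cons]
      by_cases hlet : t = "let"
      · simp only [if_pos hlet]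
        rw [ih _ _ m]
      · by_cases hend : t = "end"
        · simp only [if_neg hlet, if_pos hend]
          cases s with
          | nil =>
              show matchGo r (idx + 1) [] m = m ++ matchGo r (idx + 1) [] []
              exact ih _ _ m
          | cons j s' =>
              show matchGo r (idx + 1) s' (m ++ [(j, idx)])
                  = m ++ matchGo r (idx + 1) s' ([] ++ [(j, idx)])
              rw [ih _ _ (m ++ [(j, idx)]), ih _ _ ([] ++ [(j, idx)])]
              simp
        · simp only [if_neg hlet, if_neg hend]
          exact ih _ _ m

lemma matchGo_split :
    ∀ (l : List String) (idx : Nat) (s : List Nat) (j : Nat),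
      (matchGo l idx (s ++ [j]) []).Perm
        (matchGo l idx s [] ++ ((collectPos l s.length).map (fun p => (j, idx + p))).toList) := by
  intro l
  induction l with
  | nil => intro idx s j; simp [collectPos]
  | cons t r ih =>
      intro idx s j
      rw [matchGo_cons, matchGo_cons]
      simp only [collectPos]
      by_cases hlet : t = "let"
      · simp only [if_pos hlet, optpair_shift]
        have h := ih (idx + 1) (idx :: s) j
        simpa [List.length_cons] using h
      · by_cases hend : t = "end"
        · simp only [if_neg hlet, if_pos hend]
          cases s with
          | nil =>
              show (matchGo r (idx + 1) [] ([] ++ [(j, idx)])).Perm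
                (matchGo r (idx + 1) [] []
                  ++ ((if (0 : Nat) = 0 then some 0
                        else (collectPos r (0 - 1)).map (· + 1)).map
                      (fun p => (j, idx + p))).toList
                )
              rw [matchGo_thread r (idx + 1) [] ([] ++ [(j, idx)])]
              simpa using
                List.perm_append_comm (l₁ := [(j, idx)]) (l₂ := matchGo r (idx + 1) [] [])
          | cons a s' =>
              show (matchGo r (idx + 1) (s' ++ [j]) ([] ++ [(a, idx)])).Perm
                (matchGo r (idx + 1) s' ([] ++ [(a, idx)])
                  ++ ((if (a :: s').length = 0 then some 0
                        else (collectPos r ((a :: s').length - 1)).map (· + 1)).map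
                      (fun p => (j, idx + p))).toList
                )
              simp only [List.length_cons, Nat.add_sub_cancel,
                if_neg (by omega : ¬ s'.length + 1 = 0), optpair_shift]
              rw [matchGo_thread r (idx + 1) (s' ++ [j]) ([] ++ [(a, idx)]),
                  matchGo_thread r (idx + 1) s' ([] ++ [(a, idx)])]
              simp only [List.nil_append, List.cons_append]
              exact (ih (idx + 1) s' j).cons _
        · simp only [if_neg hlet, if_neg hend, optpair_shift]
          exact ih (idx + 1) s j

lemma matchGo_perm_specPairs :
    ∀ (l : List String) (idx : Nat), (matchGo l idx [] []).Perm (specPairs l idx) := by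
  intro l
  induction l with
  | nil => intro idx; simp [specPairs]
  | cons t r ih =>
      intro idx
      rw [matchGo_cons]
      simp only [specPairs]
      by_cases hlet : t = "let"
      · simp only [if_pos hlet]
        have h1 := matchGo_split r (idx + 1) [] idx
        simp only [List.nil_append, List.length_nil] at h1
        refine h1.trans ?_
        refine ((ih (idx + 1)).append (List.Perm.refl _)).trans ?_
        exact List.perm_append_comm
      · by_cases hend : t = "end"
        · simpa [hlet, hend] using ih (idx + 1)
        · simpa [hlet, hend] using ih (idx + 1)

lemma specPairs_bounds :
    ∀ (l : List String) (idx : Nat) (p : Nat × Nat), p ∈ specPairs l idx →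
      idx ≤ p.1 ∧ p.1 + 1 ≤ p.2 := by
  intro l
  induction l with
  | nil => intro idx p hp; simp [specPairs] at hp
  | cons t r ih =>
      intro idx p hp
      simp only [specPairs, List.mem_append] at hp
      rcases hp with hp | hp
      · by_cases hlet : t = "let"
        · simp only [if_pos hlet] at hp
          cases hcp : collectPos r 0 with
          | none => simp [hcp] at hp
          | some q =>
              simp [hcp] at hp; subst hp
              exact ⟨le_rfl, Nat.le_add_right _ _⟩
        · simp [hlet] at hp
      · have := ih (idx + 1) p hp; omega

lemma specPairs_pairwise :
    ∀ (l : List String) (idx : Nat),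
      (specPairs l idx).Pairwise (fun a b => a.1 < b.1) := by
  intro l
  induction l with
  | nil => intro idx; simp [specPairs]
  | cons t r ih =>
      intro idx
      simp only [specPairs]
      refine List.pairwise_append.mpr ⟨?_, ih (idx + 1), ?_⟩
      · by_cases hlet : t = "let"
        · cases collectPos r 0 <;> simp [hlet]
        · simp [hlet]
      · intro a ha b hb
        have hb' := specPairs_bounds r (idx + 1) b hb
        by_cases hlet : t = "let"
        · simp only [if_pos hlet] at ha
          cases hcp : collectPos r 0 with
          | none => simp [hcp] at ha
          | some q => simp [hcp] at ha; subst ha; simp; omega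
        · simp [hlet] at ha

lemma map_specPairs_eq_segs (l : List String) :
    ∀ (rest : List String) (fi : Nat), l.drop fi = rest →
      (specPairs rest fi).map
          (fun p => PySem.List.slice l (some ((p.1 + 1 : Nat) : Int)) (some ((p.2 : Nat) : Int)))
        = segs rest := by
  intro rest
  induction rest with
  | nil => intro fi h; simp [specPairs, segs]
  | cons t r ih =>
      intro fi h
      obtain ⟨hk, hget, hdrop⟩ := drop_cons_facts l fi t r h
      simp only [specPairs, segs, List.map_append]
      rw [ih (fi + 1) hdrop]
      congr 1
      by_cases hlet : t = "let"
      · simp only [if_pos hlet]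
        cases hcp : collectPos r 0 with
        | none => simp
        | some p =>
            simp only [Option.map_some, Option.toList_some, List.map_cons, List.map_nil]
            congr 1
            have hcast : ((fi + 1 + p : Nat) : Int) = ((fi + 1 : Nat) : Int) + ((p : Nat) : Int) := by
              push_cast; ring
            rw [hcast, PySem.List.slice_natCast_add]
            rw [hdrop]
      · simp [hlet]

lemma getlet_alt_eq (l : List String) :
    getlet_alt l =
      (specPairs l 0).map
        (fun p => PySem.List.slice l (some ((p.1 + 1 : Nat) : Int)) (some ((p.2 : Nat) : Int))) := by
  have hs : PySem.List.sorted (matchGo l 0 [] []) (fun p : Nat × Nat => p.1) false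
      = specPairs l 0 :=
    PySem.List.sorted_eq_of_perm_of_pairwise_lt
      (matchGo l 0 [] []) (specPairs l 0) (fun p => p.1)
      ((matchGo_perm_specPairs l 0).symm)
      (specPairs_pairwise l 0)
  unfold getlet_alt
  rw [hs]

-- ===== VERDICT (by name: the statement is the Claim_ definition above) =====
theorem getlet_spec : Claim_equal_getlet := by
  intro inputList _
  unfold Spec_getlet
  rw [getlet_eq_segs, getlet_alt_eq]
  exact (map_specPairs_eq_segs inputList inputList 0 (by simp)).symm
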